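-- pv_equiv track=rewrite | github.com/pypi-data/pypi-mirror-378 | packages/kdotpy/kdotpy-1.3.0-py3-none-any.whl/kdotpy/bhzprint.py | tex_splitterms
-- ===== SOURCE A (Python) =====
-- def tex_splitterms(s_in, n, newline = ' \\nonumber\\\\\n  &'):
-- 	"""Split TeX output into terms, preventing extremely long lines in the TeX source.
--
-- 	Arguments:
-- 	s_in       String. The input.
-- 	n          Integer. Target maximum line length.
-- 	newline    String. TeX string for a newline.
-- 	"""
-- 	j = 0   # term counter; fold if equal to n
-- 	cb = 0  # curly bracket level
-- 	s_out = ""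
-- 	for s in s_in:
-- 		if cb == 0 and s in '+-':
-- 			if j >= n:
-- 				s_out += newline
-- 				j = 0
-- 			else:
-- 				j += 1
-- 		elif s == '{':
-- 			cb += 1
-- 		elif s == '}':
-- 			cb -= 1
-- 		s_out += s
-- 	return s_out
-- ===== SOURCE B (Python) =====
-- def tex_splitterms(s_in, n, newline = ' \\nonumber\\\\\n  &'):
--     """Two-pass rewrite: split into top-level-operator segments, then fold by term count."""
--     # pass 1: split s_in into the leading segment plus operator-led segments
--     done = []
--     cur = ''
--     cb = 0  # curly bracket level
--     for ch in s_in: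
--         if cb == 0 and ch in '+-':
--             done.append(cur)
--             cur = ch
--         else:
--             if ch == '{':
--                 cb += 1
--             elif ch == '}':
--                 cb -= 1
--             cur += ch
--     done.append(cur)
--     # pass 2: emit leading segment, folding before an operator segment when j >= n
--     out = done[0]
--     j = 0
--     for seg in done[1:]:
--         if j >= n:
--             out += newline
--             j = 0
--         else:
--             j += 1
--         out += seg
--     return out
-- ===== Notes on version B (the rewrite author's own statement) =====
-- stated objective: alternative
-- what changed: B replaces A's single interleaved scan (counter + bracket depth + output built together) by two passes: first split the input into the leading segment plus top-level-operator-led segments, then fold that segment list with the term counter to insert newlines.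
import Mathlib
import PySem

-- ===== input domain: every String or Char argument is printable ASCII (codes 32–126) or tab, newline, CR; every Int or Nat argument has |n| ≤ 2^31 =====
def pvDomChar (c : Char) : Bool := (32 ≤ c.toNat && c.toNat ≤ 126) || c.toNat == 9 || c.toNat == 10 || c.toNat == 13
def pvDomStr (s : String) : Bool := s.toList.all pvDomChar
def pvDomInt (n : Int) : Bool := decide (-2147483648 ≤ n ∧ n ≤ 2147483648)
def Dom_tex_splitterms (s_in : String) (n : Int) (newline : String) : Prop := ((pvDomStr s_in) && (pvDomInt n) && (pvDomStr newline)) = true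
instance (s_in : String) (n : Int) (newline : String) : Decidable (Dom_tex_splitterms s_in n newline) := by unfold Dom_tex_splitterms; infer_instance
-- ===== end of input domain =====

-- B re-implements A as two passes (segment split, then fold) — same return value, objective: alternative decomposition.

-- ===== PORT A =====
-- loop body of A's single character scan; state = (j, cb, s_out)
def texAStep (n : Int) (nl : List Char) (st : Int × Int × List Char) (s : Char) :
    Int × Int × List Char :=
  let (j, cb, s_out) := st
  if cb = 0 ∧ (s = '+' ∨ s = '-') then
    if j ≥ n then (0, cb, s_out ++ nl ++ [s])
    else (j + 1, cb, s_out ++ [s])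
  else if s = '{' then (j, cb + 1, s_out ++ [s])
  else if s = '}' then (j, cb - 1, s_out ++ [s])
  else (j, cb, s_out ++ [s])

def tex_splitterms (s_in : String) (n : Int) (newline : String) : String :=
  String.mk (s_in.toList.foldl (texAStep n newline.toList) (0, 0, [])).2.2

-- ===== PORT B =====
-- pass 1 loop body: state = (cb, done, cur); a top-level '+'/'-' closes cur and starts a new segment
def texAltPass1 (st : Int × List (List Char) × List Char) (ch : Char) :
    Int × List (List Char) × List Char :=
  let (cb, done, cur) := st
  if cb = 0 ∧ (ch = '+' ∨ ch = '-') then (cb, done ++ [cur], [ch])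
  else
    let cb' := if ch = '{' then cb + 1 else if ch = '}' then cb - 1 else cb
    (cb', done, cur ++ [ch])

-- pass 2 loop body: state = (j, out); fold (emit newline) before a segment when j >= n
def texAltPass2 (n : Int) (nl : List Char) (st : Int × List Char) (seg : List Char) :
    Int × List Char :=
  let (j, out) := st
  if j ≥ n then (0, out ++ nl ++ seg) else (j + 1, out ++ seg)

def tex_splitterms_alt (s_in : String) (n : Int) (newline : String) : String :=
  let r := s_in.toList.foldl texAltPass1 (0, [], [])
  let segs := r.2.1 ++ [r.2.2]   -- done.append(cur)
  match segs with
  | [] => ""                      -- unreachable: segs is nonempty by construction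
  | s0 :: rest =>
      String.mk (rest.foldl (texAltPass2 n newline.toList) (0, s0)).2

-- ===== PRECONDITION & SPEC =====
def Spec_tex_splitterms (s_in : String) (n : Int) (newline : String) (out : String) : Prop := out = tex_splitterms_alt s_in n newline
instance (s_in : String) (n : Int) (newline : String) (out : String) : Decidable (Spec_tex_splitterms s_in n newline out) := by unfold Spec_tex_splitterms; infer_instance

-- ===== CLAIM (what is proved, stated in full; the proofs are below) =====
def Claim_equal_tex_splitterms : Prop := ∀ (s_in : String) (n : Int) (newline : String), Dom_tex_splitterms s_in n newline → Spec_tex_splitterms s_in n newline (tex_splitterms s_in n newline)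

-- ===== LEMMAS AND PROOFS =====

-- Recursive characterisation of pass 1: (leading segment, operator-led segments)
def texSegs : List Char → Int → List Char × List (List Char)
  | [], _ => ([], [])
  | c :: cs, cb =>
    if cb = 0 ∧ (c = '+' ∨ c = '-') then
      let r := texSegs cs cb
      ([], (c :: r.1) :: r.2)
    else
      let cb' := if c = '{' then cb + 1 else if c = '}' then cb - 1 else cb
      let r := texSegs cs cb'
      (c :: r.1, r.2)

-- Recursive characterisation of pass 2 over the operator-led segments
def texRender (n : Int) (nl : List Char) : Int → List (List Char) → List Char
  | _, [] => []
  | j, seg :: t =>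
      if j ≥ n then nl ++ seg ++ texRender n nl 0 t
      else seg ++ texRender n nl (j + 1) t

-- A's scan equals: emitted prefix ++ leading segment ++ rendered operator segments
theorem texA_eq_render (n : Int) (nl : List Char) :
    ∀ (cs : List Char) (j cb : Int) (out : List Char),
      (cs.foldl (texAStep n nl) (j, cb, out)).2.2
        = out ++ (texSegs cs cb).1 ++ texRender n nl j (texSegs cs cb).2 := by
  intro cs
  induction cs with
  | nil => intro j cb out; simp [texSegs, texRender]
  | cons c cs ih =>
    intro j cb out
    by_cases hop : cb = 0 ∧ (c = '+' ∨ c = '-')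
    · by_cases hj : j ≥ n
      · simp [texAStep, texSegs, texRender, hop, hj, ih]
      · simp [texAStep, texSegs, texRender, hop, hj, ih]
    · simp only [List.foldl_cons, texAStep, texSegs, if_neg hop]
      split_ifs with h1 h2 <;> simp [ih]

-- Pass 1 (foldl) computes texSegs, threaded through (done, cur)
theorem texPass1_eq_segs :
    ∀ (cs : List Char) (cb : Int) (done : List (List Char)) (cur : List Char),
      (cs.foldl texAltPass1 (cb, done, cur)).2.1 ++ [(cs.foldl texAltPass1 (cb, done, cur)).2.2]
        = done ++ (cur ++ (texSegs cs cb).1) :: (texSegs cs cb).2 := by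
  intro cs
  induction cs with
  | nil => intro cb done cur; simp [texSegs]
  | cons c cs ih =>
    intro cb done cur
    by_cases hop : cb = 0 ∧ (c = '+' ∨ c = '-')
    · simp [texAltPass1, texSegs, hop, ih]
    · simp only [List.foldl_cons, texAltPass1, if_neg hop, texSegs]
      rw [ih]
      simp

-- Pass 2 (foldl) computes texRender
theorem texPass2_eq_render (n : Int) (nl : List Char) :
    ∀ (t : List (List Char)) (j : Int) (out : List Char),
      (t.foldl (texAltPass2 n nl) (j, out)).2 = out ++ texRender n nl j t := by
  intro t
  induction t with
  | nil => intro j out; simp [texRender]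
  | cons seg t ih =>
    intro j out
    by_cases hj : j ≥ n
    · simp [texAltPass2, texRender, hj, ih]
    · simp [texAltPass2, texRender, hj, ih]

-- ===== VERDICT (by name: the statement is the Claim_ definition above) =====
theorem tex_splitterms_spec : Claim_equal_tex_splitterms := by
  intro s_in n newline _
  show tex_splitterms s_in n newline = tex_splitterms_alt s_in n newline
  unfold tex_splitterms tex_splitterms_alt
  have hA := texA_eq_render n newline.toList s_in.toList 0 0 []
  have hB1 := texPass1_eq_segs s_in.toList 0 [] []
  rcases hseg : texSegs s_in.toList 0 with ⟨h, t⟩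
  rw [hseg] at hA hB1
  simp only [List.nil_append] at hA hB1
  rcases hr : s_in.toList.foldl texAltPass1 (0, [], []) with ⟨cbf, done, cur⟩
  rw [hr] at hB1
  simp only at hB1
  rw [hA]
  simp only [hr]
  rw [hB1]
  simp [texPass2_eq_render]
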